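-- pv_equiv track=rewrite | github.com/MangetsuC/SakikoBot | sakikobot/plugins/help_pic/md2img.py | decode_wrap
-- ===== SOURCE A (Python) =====
-- def decode_wrap(md_txt: str) -> list[str]:
--     md_list = md_txt.split('\n')
--     ans = []
--     tmp_str = []
--
--     for l in md_list:
--         if l:
--             tmp_str.append(l.strip(' '))
--         else:
--             if tmp_str:
--                 ans.append('%bk%'.join(tmp_str))
--                 tmp_str.clear()
--             ans.append('\n')
--     else:
--         if tmp_str:
--             ans.append('%bk%'.join(tmp_str))
--     return ans
-- ===== SOURCE B (Python) =====
-- def decode_wrap(md_txt: str) -> list[str]: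
--     lines = md_txt.split('\n')
--     ans = []
--     i = 0
--     n = len(lines)
--     while i < n:
--         if lines[i]:
--             j = i
--             while j < n and lines[j]:
--                 j += 1
--             ans.append('%bk%'.join(s.strip(' ') for s in lines[i:j]))
--             i = j
--         else:
--             ans.append('\n')
--             i += 1
--     return ans
-- ===== Notes on version B (the rewrite author's own statement) =====
-- stated objective: alternative
-- what changed: Replaces A's running tmp_str accumulator with its for-else trailing flush by a span-based single pass: each maximal run of non-empty lines is located (inner scan), sliced out, stripped and joined at once, and each empty line emits one newline marker.
import Mathlib
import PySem

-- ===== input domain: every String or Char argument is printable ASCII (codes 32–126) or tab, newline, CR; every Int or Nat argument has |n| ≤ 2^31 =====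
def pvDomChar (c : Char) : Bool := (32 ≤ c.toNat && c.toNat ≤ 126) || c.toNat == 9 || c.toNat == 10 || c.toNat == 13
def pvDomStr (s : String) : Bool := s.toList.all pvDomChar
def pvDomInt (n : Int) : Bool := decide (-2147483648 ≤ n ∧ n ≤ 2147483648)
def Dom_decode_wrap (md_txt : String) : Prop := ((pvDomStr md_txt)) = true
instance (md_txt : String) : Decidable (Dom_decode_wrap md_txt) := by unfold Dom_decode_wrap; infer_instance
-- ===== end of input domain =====

-- B replaces A's tmp_str accumulator + for-else trailing flush with a span-based grouping
-- (each maximal run of non-empty lines is sliced out and joined at once); objective: alternative.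

-- ===== PORT A =====
-- A's for-loop: structural recursion over the same state (ans, tmp_str); the base case is the
-- for-else trailing flush.
def decodeWrapGoA (lines ans tmp : List String) : List String :=
  match lines with
  | [] => if tmp ≠ [] then ans ++ [PySem.Str.join "%bk%" tmp] else ans
  | l :: rest =>
    if l ≠ "" then
      decodeWrapGoA rest ans (tmp ++ [PySem.Str.stripChars l " "])
    else
      if tmp ≠ [] then
        decodeWrapGoA rest (ans ++ [PySem.Str.join "%bk%" tmp] ++ ["\n"]) []
      else
        decodeWrapGoA rest (ans ++ ["\n"]) tmp

def decode_wrap (md_txt : String) : List String :=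
  let md_list := (PySem.Str.split? md_txt "\n").getD []
  decodeWrapGoA md_list [] []

-- ===== PORT B =====
-- B's outer while-loop: the inner `while j < n and lines[j]` / slice `lines[i:j]` is the
-- takeWhile/dropWhile span of the list at position i.
def decodeWrapGoB (lines : List String) : List String :=
  match lines with
  | [] => []
  | l :: rest =>
    if h : l ≠ "" then
      PySem.Str.join "%bk%" (((l :: rest).takeWhile (fun s => s ≠ "")).map
          (fun s => PySem.Str.stripChars s " "))
        :: decodeWrapGoB ((l :: rest).dropWhile (fun s => s ≠ ""))
    else
      "\n" :: decodeWrapGoB rest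
termination_by lines.length
decreasing_by
  · simp only [List.dropWhile_cons]
    rw [if_pos (by simp [h])]
    have hle := List.length_dropWhile_le (fun s : String => !decide (s = "")) rest
    exact Nat.lt_succ_of_le (by simpa using hle)
  · simp

def decode_wrap_alt (md_txt : String) : List String :=
  let lines := (PySem.Str.split? md_txt "\n").getD []
  decodeWrapGoB lines

-- ===== PRECONDITION & SPEC =====
def Spec_decode_wrap (md_txt : String) (out : List String) : Prop := out = decode_wrap_alt md_txt
instance (md_txt : String) (out : List String) : Decidable (Spec_decode_wrap md_txt out) := by unfold Spec_decode_wrap; infer_instance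

-- ===== CLAIM (what is proved, stated in full; the proofs are below) =====
def Claim_equal_decode_wrap : Prop := ∀ (md_txt : String), Dom_decode_wrap md_txt → Spec_decode_wrap md_txt (decode_wrap md_txt)

-- ===== LEMMAS AND PROOFS =====

-- A's accumulator ans only ever receives appends: it factors out front.
theorem decodeWrapGoA_ans (lines : List String) : ∀ ans tmp,
    decodeWrapGoA lines ans tmp = ans ++ decodeWrapGoA lines [] tmp := by
  induction lines with
  | nil => intro ans tmp; simp [decodeWrapGoA]; split <;> simp
  | cons l rest ih =>
    intro ans tmp
    simp only [decodeWrapGoA]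
    split
    · exact ih ans _
    · split
      · rw [ih (ans ++ _ ++ _) [], ih ([] ++ _ ++ _) []]; simp
      · rw [ih (ans ++ _) tmp, ih ([] ++ _) tmp]; simp

-- Feeding A's loop a run of non-empty lines just extends tmp with their stripped forms.
theorem decodeWrapGoA_run (grp : List String) (h : ∀ s ∈ grp, s ≠ "") :
    ∀ rest ans tmp, decodeWrapGoA (grp ++ rest) ans tmp =
      decodeWrapGoA rest ans (tmp ++ grp.map (fun s => PySem.Str.stripChars s " ")) := by
  induction grp with
  | nil => intro rest ans tmp; simp
  | cons l g ih =>
    intro rest ans tmp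
    have hl : l ≠ "" := h l (by simp)
    simp only [List.cons_append, decodeWrapGoA, if_pos hl]
    rw [ih (fun s hs => h s (by simp [hs])) rest ans]
    simp

theorem decodeWrapGo_eq (n : ℕ) : ∀ lines : List String, lines.length ≤ n →
    decodeWrapGoA lines [] [] = decodeWrapGoB lines := by
  induction n with
  | zero =>
    intro lines h
    have : lines = [] := List.eq_nil_of_length_eq_zero (Nat.le_zero.mp h)
    subst this; simp [decodeWrapGoA, decodeWrapGoB]
  | succ n ih =>
    intro lines h
    match lines with
    | [] => simp [decodeWrapGoA, decodeWrapGoB]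
    | l :: rest =>
      by_cases hl : l = ""
      · subst hl
        rw [decodeWrapGoB]
        simp only [ne_eq, not_true_eq_false, dite_false]
        rw [decodeWrapGoA]
        simp only [ne_eq, not_true_eq_false, if_false]
        rw [decodeWrapGoA_ans, ih rest (by simpa using Nat.le_of_succ_le_succ h)]
        simp
      · -- non-empty head: span
        set p : String → Bool := fun s => decide (s ≠ "") with hp
        have hsplit : (l :: rest).takeWhile p ++ (l :: rest).dropWhile p = l :: rest :=
          List.takeWhile_append_dropWhile
        have htake : ∀ s ∈ (l :: rest).takeWhile p, s ≠ "" := by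
          intro s hs
          have := List.mem_takeWhile_imp hs
          simpa [hp] using this
        have htne : (l :: rest).takeWhile p ≠ [] := by
          simp [hp, hl]
        rw [decodeWrapGoB]
        simp only [ne_eq, hl, not_false_eq_true, dite_true]
        conv_lhs => rw [← hsplit]
        rw [decodeWrapGoA_run _ htake]
        have hmapne : ((l :: rest).takeWhile p).map (fun s => PySem.Str.stripChars s " ") ≠ [] := by
          simpa using htne
        have hdlen : ((l :: rest).dropWhile p).length ≤ n := by
          have h1 : (l :: rest).dropWhile p = rest.dropWhile p := by
            simp [hp, hl]
          rw [h1]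
          exact le_trans (List.length_dropWhile_le _ _)
            (by simpa using Nat.le_of_succ_le_succ h)
        cases hd : (l :: rest).dropWhile p with
        | nil =>
          simp [decodeWrapGoA, decodeWrapGoB, hp, decide_not, hl]
        | cons d ds =>
          have hdempty : d = "" := by
            have := List.head?_dropWhile_not (p := p) (l := l :: rest)
            rw [hd] at this
            simpa [hp] using this
          subst hdempty
          have hds : ds.length ≤ n := by
            have := hdlen; rw [hd] at this; simp at this; omega
          rw [decodeWrapGoA]
          simp only [ne_eq, not_true_eq_false, if_false]
          rw [decodeWrapGoA_ans, ih ds hds]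
          rw [show decodeWrapGoB ("" :: ds) = "\n" :: decodeWrapGoB ds by
            rw [decodeWrapGoB]; simp]
          simp [hp, decide_not, hl]

-- ===== VERDICT (by name: the statement is the Claim_ definition above) =====
theorem decode_wrap_spec : Claim_equal_decode_wrap := by
  intro md_txt _
  unfold Spec_decode_wrap decode_wrap decode_wrap_alt
  exact decodeWrapGo_eq _ _ le_rfl
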